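-- pv_equiv track=rewrite | github.com/ShimOne420/tesi_bioanalyst_repo | scripts/extend_era5_to_2026.py | chunk_year_months
-- ===== SOURCE A (Python) =====
-- def chunk_year_months(year_months: list[tuple[int, int]], max_size: int) -> list[list[tuple[int, int]]]:
--     chunks: list[list[tuple[int, int]]] = []
--     current: list[tuple[int, int]] = []
--     for ym in sorted(year_months):
--         current.append(ym)
--         if len(current) >= max_size:
--             chunks.append(current)
--             current = []
--     if current:
--         chunks.append(current)
--     return chunks
-- ===== SOURCE B (Python) =====
-- def chunk_year_months(year_months: list[tuple[int, int]], max_size: int) -> list[list[tuple[int, int]]]: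
--     s = sorted(year_months)
--     step = max_size if max_size > 0 else 1
--     return [s[i:i + step] for i in range(0, len(s), step)]
-- ===== Notes on version B (the rewrite author's own statement) =====
-- stated objective: simpler
-- what changed: Replaces the running-buffer fold (append, flush when full, trailing flush) by sorting once and slicing fixed-size blocks at computed offsets via range(0, len, step), with step clamped to 1 for non-positive max_size.
import Mathlib
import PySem

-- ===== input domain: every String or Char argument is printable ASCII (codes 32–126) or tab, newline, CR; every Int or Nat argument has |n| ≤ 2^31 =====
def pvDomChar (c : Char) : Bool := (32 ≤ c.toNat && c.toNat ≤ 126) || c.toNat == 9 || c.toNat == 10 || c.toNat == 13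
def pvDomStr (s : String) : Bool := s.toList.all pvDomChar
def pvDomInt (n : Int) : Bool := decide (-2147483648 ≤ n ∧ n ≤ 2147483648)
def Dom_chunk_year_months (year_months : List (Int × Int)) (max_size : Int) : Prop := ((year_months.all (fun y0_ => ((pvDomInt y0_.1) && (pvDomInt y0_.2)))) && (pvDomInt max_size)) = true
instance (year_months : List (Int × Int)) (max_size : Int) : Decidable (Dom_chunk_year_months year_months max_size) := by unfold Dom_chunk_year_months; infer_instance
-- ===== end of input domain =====

-- B replaces A's running-buffer fold by sorting once and slicing fixed-size blocks
-- at offsets range(0, len, step) with step clamped to 1 for non-positive max_size (simpler decomposition).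


-- ===== PORT A =====
def chunk_year_months (year_months : List (Int × Int)) (max_size : Int) : List (List (Int × Int)) :=
  let p := (PySem.List.sorted2 year_months Prod.fst Prod.snd).foldl
      (fun (st : List (List (Int × Int)) × List (Int × Int)) ym =>
        let current := st.2 ++ [ym]
        if max_size ≤ (current.length : Int) then (st.1 ++ [current], ([] : List (Int × Int)))
        else (st.1, current))
      ([], [])
  if p.2 ≠ [] then p.1 ++ [p.2] else p.1

-- ===== PORT B =====
def chunk_year_months_alt (year_months : List (Int × Int)) (max_size : Int) : List (List (Int × Int)) :=
  let s := PySem.List.sorted2 year_months Prod.fst Prod.snd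
  let step := if 0 < max_size then max_size else 1
  (PySem.List.pyRange 0 (s.length : Int) step).map
    (fun i => PySem.List.slice s (some i) (some (i + step)))

-- ===== PRECONDITION & SPEC =====
def Spec_chunk_year_months (year_months : List (Int × Int)) (max_size : Int) (out : List (List (Int × Int))) : Prop := out = chunk_year_months_alt year_months max_size
instance (year_months : List (Int × Int)) (max_size : Int) (out : List (List (Int × Int))) : Decidable (Spec_chunk_year_months year_months max_size out) := by unfold Spec_chunk_year_months; infer_instance

-- ===== CLAIM (what is proved, stated in full; the proofs are below) =====
def Claim_equal_chunk_year_months : Prop := ∀ (year_months : List (Int × Int)) (max_size : Int), Dom_chunk_year_months year_months max_size → Spec_chunk_year_months year_months max_size (chunk_year_months year_months max_size)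

-- ===== LEMMAS AND PROOFS =====

-- the common chunking skeleton both ports compute: blocks of size k (k >= 1)
def pvChunks (k : Nat) : List (Int × Int) → List (List (Int × Int))
  | [] => []
  | x :: xs => (x :: xs.take (k - 1)) :: pvChunks k (xs.drop (k - 1))
termination_by l => l.length
decreasing_by simp

-- A's fold step with the flush condition on Nat lengths
def pvStep (k : Nat) (st : List (List (Int × Int)) × List (Int × Int)) (x : Int × Int) :
    List (List (Int × Int)) × List (Int × Int) :=
  let cur := st.2 ++ [x]
  if k ≤ cur.length then (st.1 ++ [cur], ([] : List (Int × Int))) else (st.1, cur)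

theorem pvChunks_nil (k : Nat) : pvChunks k [] = [] := by
  unfold pvChunks
  rfl

theorem pvChunks_cons {k : Nat} (hk : 1 ≤ k) {l : List (Int × Int)} (hl : l ≠ []) :
    pvChunks k l = l.take k :: pvChunks k (l.drop k) := by
  cases l with
  | nil => exact absurd rfl hl
  | cons x xs =>
      obtain ⟨k', rfl⟩ := Nat.exists_eq_add_of_le hk
      conv_lhs => unfold pvChunks
      simp [Nat.add_comm 1 k', List.take_succ_cons, List.drop_succ_cons]

theorem pvStep_eq (m : Int) :
    (fun (st : List (List (Int × Int)) × List (Int × Int)) ym =>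
        let current := st.2 ++ [ym]
        if m ≤ (current.length : Int) then (st.1 ++ [current], ([] : List (Int × Int)))
        else (st.1, current))
      = pvStep (if 0 < m then m.toNat else 1) := by
  funext st x
  simp only [pvStep]
  refine if_congr ?_ rfl rfl
  by_cases hm : 0 < m <;> simp [hm, List.length_append] <;> omega

theorem pvFold_flush {k : Nat} (hk : 1 ≤ k) :
    ∀ (l : List (Int × Int)) (cur : List (Int × Int)) (cs : List (List (Int × Int))),
      cur.length < k →
      l.foldl (pvStep k) (cs, cur) =
        if l.length + cur.length < k then (cs, cur ++ l)
        else (l.drop (k - cur.length)).foldl (pvStep k)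
              (cs ++ [cur ++ l.take (k - cur.length)], []) := by
  intro l
  induction l with
  | nil =>
      intro cur cs hcur
      simp [hcur]
  | cons x xs ih =>
      intro cur cs hcur
      simp only [List.foldl_cons]
      by_cases hfull : k ≤ (cur ++ [x]).length
      · have hklen : k = cur.length + 1 := by
          simp at hfull; omega
        have ht : k - cur.length = 1 := by omega
        have hcond : ¬ ((x :: xs).length + cur.length < k) := by simp; omega
        rw [pvStep, if_pos (by simpa using hfull)]
        rw [if_neg hcond, ht]
        simp
      · have hcur' : (cur ++ [x]).length < k := by omega
        rw [pvStep, if_neg hfull]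
        rw [ih (cur ++ [x]) cs hcur']
        have hlen : (cur ++ [x]).length = cur.length + 1 := by simp
        by_cases hsmall : xs.length + (cur.length + 1) < k
        · rw [if_pos (by omega), if_pos (by simp; omega)]
          simp
        · rw [if_neg (by omega), if_neg (by simp; omega)]
          have hk1 : k - cur.length = (k - (cur.length + 1)) + 1 := by
            simp at hcur'; omega
          rw [hlen, hk1]
          simp [List.take_succ_cons, List.drop_succ_cons]

theorem pvFold_chunks {k : Nat} (hk : 1 ≤ k) :
    ∀ (l : List (Int × Int)) (cs : List (List (Int × Int))),
      (let p := l.foldl (pvStep k) (cs, []);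
        if p.2 ≠ [] then p.1 ++ [p.2] else p.1) = cs ++ pvChunks k l := by
  intro l
  induction hn : l.length using Nat.strong_induction_on generalizing l with
  | _ n ih =>
    intro cs
    subst hn
    rw [pvFold_flush hk l [] cs (by simpa using hk)]
    cases l with
    | nil =>
        have h0 : 0 < k := hk
        simp [pvChunks_nil, h0]
    | cons x xs =>
        by_cases hsmall : (x :: xs).length + ([] : List (Int × Int)).length < k
        · rw [if_pos hsmall]
          have hxs : xs.drop (k - 1) = [] := by
            apply List.drop_eq_nil_of_le; simp at hsmall; omega
          have hxs2 : xs.take (k - 1) = xs := by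
            apply List.take_of_length_le; simp at hsmall; omega
          conv_rhs => unfold pvChunks
          simp [hxs, hxs2, pvChunks_nil]
        · rw [if_neg hsmall]
          simp only [List.length_nil, Nat.sub_zero, List.nil_append]
          rw [ih ((x :: xs).drop k).length
                (by simp only [List.length_drop, List.length_cons]; omega) _ rfl]
          conv_rhs => rw [pvChunks_cons hk (by simp)]
          simp

-- range(a, b, s) with positive step: peel off the first index
theorem pvRange_pos_cons {a b s : Int} (hs : 0 < s) (hab : a < b) :
    PySem.List.pyRange a b s = a :: PySem.List.pyRange (a + s) b s := by
  rw [PySem.List.pyRange_of_pos a b hs, PySem.List.pyRange_of_pos (a + s) b hs]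
  rw [if_pos hab]
  have hd0 : 0 ≤ (b - a - 1) / s := Int.ediv_nonneg (by omega) (by omega)
  have hcount : b - a + s - 1 = (b - a - 1) + 1 * s := by ring
  have h1 : (b - a + s - 1) / s = (b - a - 1) / s + 1 := by
    rw [hcount, Int.add_mul_ediv_right _ _ (by omega)]
  have h2 : ((b - a + s - 1) / s).toNat = ((b - a - 1) / s).toNat + 1 := by
    omega
  rw [h2, List.range_succ_eq_map]
  simp only [List.map_cons, List.map_map]
  rw [List.cons_eq_cons]
  constructor
  · push_cast; ring
  · by_cases hab' : a + s < b
    · rw [if_pos hab']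
      have heq : (b - (a + s) + s - 1) = (b - a - 1) := by ring
      rw [heq]
      apply List.map_congr_left
      intro j _
      simp [Function.comp]; push_cast; ring
    · rw [if_neg hab']
      have hz : (b - a - 1) / s = 0 :=
        Int.ediv_eq_zero_of_lt (by omega) (by omega)
      rw [hz]
      simp

theorem pvSlices_chunks {k : Nat} (hk : 1 ≤ k) :
    ∀ (l : List (Int × Int)) (d : Nat),
      (PySem.List.pyRange (d : Int) (l.length : Int) (k : Int)).map
          (fun i => PySem.List.slice l (some i) (some (i + (k : Int))))
        = pvChunks k (l.drop d) := by
  intro l d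
  induction hn : l.length - d using Nat.strong_induction_on generalizing d with
  | _ n ih =>
    subst hn
    by_cases hd : l.length ≤ d
    · have h1 : (l.length : Int) ≤ (d : Int) := by exact_mod_cast hd
      rw [PySem.List.pyRange_of_pos _ _ (by exact_mod_cast hk)]
      rw [if_neg (by omega)]
      have hnil : l.drop d = [] := List.drop_eq_nil_of_le hd
      simp [hnil, pvChunks_nil]
    · push_neg at hd
      rw [pvRange_pos_cons (by exact_mod_cast hk) (by exact_mod_cast hd)]
      rw [List.map_cons]
      have hhead : PySem.List.slice l (some (d : Int)) (some ((d : Int) + (k : Int))) =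
          (l.drop d).take k := PySem.List.slice_natCast_add l d k
      have hcast : ((d : Int) + (k : Int)) = ((d + k : Nat) : Int) := by push_cast; ring
      rw [hhead, hcast]
      rw [ih (l.length - (d + k)) (by omega) (d + k) rfl]
      have hne : l.drop d ≠ [] := by
        intro h
        have hlen := List.drop_eq_nil_iff.mp h
        omega
      conv_rhs => rw [pvChunks_cons hk hne]
      rw [List.drop_drop]

-- ===== VERDICT (by name: the statement is the Claim_ definition above) =====
theorem chunk_year_months_spec : Claim_equal_chunk_year_months := by
  intro ys m _
  unfold Spec_chunk_year_months chunk_year_months chunk_year_months_alt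
  set s := PySem.List.sorted2 ys Prod.fst Prod.snd with hs
  set k : Nat := if 0 < m then m.toNat else 1 with hkdef
  have hk : 1 ≤ k := by by_cases h : 0 < m <;> simp [hkdef, h] <;> omega
  have hstep : (if 0 < m then m else 1) = (k : Int) := by
    by_cases h : 0 < m <;> simp [hkdef, h] <;> omega
  simp only []
  rw [pvStep_eq m, ← hkdef]
  rw [pvFold_chunks hk s []]
  rw [hstep]
  have h0 : (0 : Int) = ((0 : Nat) : Int) := rfl
  rw [h0, pvSlices_chunks hk s 0]
  simp
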